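-- pv_equiv track=rewrite | github.com/Federico2008/nico_camera | vision/tier1.py | _parse_numbered
-- ===== SOURCE A (Python) =====
-- def _parse_numbered(raw: str, questions: list[str]) -> dict[str, str]:
--     """
--     Parsa risposte numerate. Accetta i separatori che moondream produce in pratica:
--         1. yes  |  1- yes  |  1) yes  |  1 yes
--     Fallback: usa la riga i-esima se nessun prefisso combacia.
--     """
--     lines = [l.strip() for l in raw.splitlines() if l.strip()]
--     answers: dict[str, str] = {}
--     for i, q in enumerate(questions):
--         n = str(i + 1)
--         match: str | None = None
--         for line in lines:
--             for sep in (".", "-", ")", " "):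
--                 prefix = n + sep
--                 if line.startswith(prefix):
--                     match = line[len(prefix):].strip().lstrip("- ")
--                     break
--             if match is not None:
--                 break
--         if match is None:
--             match = lines[i] if i < len(lines) else ""
--         answers[q] = match
--     return answers
-- ===== SOURCE B (Python) =====
-- def _parse_numbered(raw: str, questions: list[str]) -> dict[str, str]:
--     # One pass over the lines: each non-empty stripped line can answer at most one
--     # number (its full leading digit run, when followed by '.', '-', ')' or ' ');
--     # index answers by that number once, then answer each question by O(1) lookup.
--     lines = [l.strip() for l in raw.splitlines() if l.strip()]
--     by_num: dict[str, str] = {}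
--     for line in lines:
--         j = 0
--         while j < len(line) and line[j].isdigit():
--             j += 1
--         if 0 < j < len(line) and line[j] in ".-) ":
--             by_num.setdefault(line[:j], line[j + 1:].strip().lstrip("- "))
--     answers: dict[str, str] = {}
--     for i, q in enumerate(questions):
--         answers[q] = by_num.get(str(i + 1), lines[i] if i < len(lines) else "")
--     return answers
-- ===== Notes on version B (the rewrite author's own statement) =====
-- stated objective: faster
-- what changed: A rescans every line (trying four separator prefixes each) for every question; B makes one pass over the lines, indexing each line by its leading digit run into a dict (first occurrence wins), then answers each question with a single O(1) lookup plus the same positional fallback.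
import Mathlib
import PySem

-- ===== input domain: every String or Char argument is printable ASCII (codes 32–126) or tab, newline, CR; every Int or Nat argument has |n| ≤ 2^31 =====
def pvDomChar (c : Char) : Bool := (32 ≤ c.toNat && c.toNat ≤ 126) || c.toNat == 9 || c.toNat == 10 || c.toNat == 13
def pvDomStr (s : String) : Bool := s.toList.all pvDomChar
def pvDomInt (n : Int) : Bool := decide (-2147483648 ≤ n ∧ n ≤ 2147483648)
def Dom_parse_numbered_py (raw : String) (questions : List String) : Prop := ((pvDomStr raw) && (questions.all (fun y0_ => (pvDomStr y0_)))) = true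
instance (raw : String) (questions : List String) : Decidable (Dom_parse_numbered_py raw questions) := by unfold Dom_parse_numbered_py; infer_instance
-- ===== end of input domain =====

-- B replaces A's per-question rescans of all lines by one pass that indexes each
-- line by its leading number, then answers every question by a single dict lookup.

-- shared primitive gap-filler: s.lstrip("- ") — PySem has no lstrip-with-chars;
-- exact: drops leading characters belonging to the set {'-', ' '}
def pvLstripDashSpace (cs : List Char) : List Char := cs.dropWhile (fun c => c == '-' || c == ' ')
-- the separators ".", "-", ")", " " (A's tuple, in order; B's membership string ".-) ")
def pvSeps : List Char := ['.', '-', ')', ' ']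

-- ===== PORT A =====

-- A's inner `for sep in (...)` loop with its break; `line[len(prefix):]` is
-- List.drop, exact for a nonnegative start index
def pvMatchSeps (n line : List Char) : List Char → Option (List Char)
  | [] => none
  | sep :: rest =>
    if PySem.Chars.startswith line (n ++ [sep]) then
      some (pvLstripDashSpace (PySem.Chars.strip (line.drop (n ++ [sep]).length)))
    else pvMatchSeps n line rest

-- A's `for line in lines` loop with its break
def pvFindMatch (n : List Char) : List (List Char) → Option (List Char)
  | [] => none
  | line :: rest =>
    match pvMatchSeps n line pvSeps with
    | some m => some m
    | none => pvFindMatch n rest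

def parse_numbered_py (raw : String) (questions : List String) : List (String × String) :=
  let lines := ((PySem.Chars.splitlines raw.toList).map PySem.Chars.strip).filter (fun l => !l.isEmpty)
  ((PySem.List.enumerate questions).foldl (fun (d : PySem.Dict String String) iq =>
    let n := PySem.Int.toChars (iq.1 + 1)
    let m := match pvFindMatch n lines with
      | some m => m
      | none => if iq.1 < (lines.length : Int) then PySem.List.pyGetD lines iq.1 [] else []
    d.insert iq.2 (String.ofList m)) PySem.Dict.empty).items

-- ===== PORT B =====
-- B's per-line work: the `while` loop counting leading digits is the
-- takeWhile/dropWhile split at the first non-digit; then the key/value pair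
def pvLineKV? (line : List Char) : Option (List Char × List Char) :=
  let key := line.takeWhile PySem.Chars.isdigit
  match line.dropWhile PySem.Chars.isdigit with
  | [] => none
  | c :: rest =>
    if key ≠ [] ∧ c ∈ pvSeps then
      some (key, pvLstripDashSpace (PySem.Chars.strip rest))
    else none

def parse_numbered_py_alt (raw : String) (questions : List String) : List (String × String) :=
  let lines := ((PySem.Chars.splitlines raw.toList).map PySem.Chars.strip).filter (fun l => !l.isEmpty)
  let by_num := lines.foldl (fun (d : PySem.Dict String String) line =>
    match pvLineKV? line with
    | some kv => d.setdefault (String.ofList kv.1) (String.ofList kv.2)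
    | none => d) PySem.Dict.empty
  ((PySem.List.enumerate questions).foldl (fun (d : PySem.Dict String String) iq =>
    d.insert iq.2 ((by_num.get? (PySem.Int.toStr (iq.1 + 1))).getD
      (String.ofList (if iq.1 < (lines.length : Int) then PySem.List.pyGetD lines iq.1 [] else [])))) PySem.Dict.empty).items

-- ===== PRECONDITION & SPEC =====
def Spec_parse_numbered_py (raw : String) (questions : List String) (out : List (String × String)) : Prop := out = parse_numbered_py_alt raw questions
instance (raw : String) (questions : List String) (out : List (String × String)) : Decidable (Spec_parse_numbered_py raw questions out) := by unfold Spec_parse_numbered_py; infer_instance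

-- ===== CLAIM (what is proved, stated in full; the proofs are below) =====
def Claim_equal_parse_numbered_py : Prop := ∀ (raw : String) (questions : List String), Dom_parse_numbered_py raw questions → Spec_parse_numbered_py raw questions (parse_numbered_py raw questions)

-- ===== LEMMAS AND PROOFS =====

-- str(i+1) consists of digits and is nonempty
theorem pv_digitChar_isdigit (m : Nat) (h : m < 10) : PySem.Chars.isdigit (Nat.digitChar m) = true := by
  interval_cases m <;> decide

theorem pv_toDigitsCore_digits (f : Nat) : ∀ (n : Nat) (ds : List Char),
    (∀ c ∈ ds, PySem.Chars.isdigit c = true) →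
    ∀ c ∈ Nat.toDigitsCore 10 f n ds, PySem.Chars.isdigit c = true := by
  induction f with
  | zero => intro n ds hds; simpa [Nat.toDigitsCore] using hds
  | succ f ih =>
    intro n ds hds
    simp only [Nat.toDigitsCore]
    have hd : ∀ c ∈ Nat.digitChar (n % 10) :: ds, PySem.Chars.isdigit c = true := by
      intro c hc
      rcases List.mem_cons.mp hc with h | h
      · subst h; exact pv_digitChar_isdigit _ (Nat.mod_lt _ (by omega))
      · exact hds c h
    split
    · exact hd
    · exact ih _ _ hd

theorem pv_toDigitsCore_ne_nil (f : Nat) : ∀ (n : Nat) (ds : List Char),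
    ds ≠ [] → Nat.toDigitsCore 10 f n ds ≠ [] := by
  induction f with
  | zero => intro n ds h; simpa [Nat.toDigitsCore] using h
  | succ f ih =>
    intro n ds h
    simp only [Nat.toDigitsCore]
    split
    · simp
    · exact ih _ _ (by simp)

theorem pv_toDigitsCore_succ_ne_nil (f n : Nat) (ds : List Char) :
    Nat.toDigitsCore 10 (f + 1) n ds ≠ [] := by
  simp only [Nat.toDigitsCore]
  split
  · simp
  · exact pv_toDigitsCore_ne_nil _ _ _ (List.cons_ne_nil _ _)

theorem pv_toChars_digits (m : Int) (hm : 0 ≤ m) :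
    PySem.Int.toChars m ≠ [] ∧ ∀ c ∈ PySem.Int.toChars m, PySem.Chars.isdigit c = true := by
  have : PySem.Int.toChars m = Nat.toDigits 10 m.toNat := by
    simp [PySem.Int.toChars, not_lt.mpr hm]
  rw [this, Nat.toDigits]
  exact ⟨pv_toDigitsCore_succ_ne_nil _ _ _, pv_toDigitsCore_digits _ _ _ (by simp)⟩

-- splitting a line that literally starts with digits-then-nondigit
theorem pv_takeWhile_split (n : List Char) (hd : ∀ c ∈ n, PySem.Chars.isdigit c = true)
    (d : Char) (hdd : PySem.Chars.isdigit d = false) (t : List Char) :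
    (n ++ d :: t).takeWhile PySem.Chars.isdigit = n ∧
    (n ++ d :: t).dropWhile PySem.Chars.isdigit = d :: t := by
  induction n with
  | nil => simp [List.takeWhile_cons, List.dropWhile_cons, hdd]
  | cons a n ih =>
    have ha : PySem.Chars.isdigit a = true := hd a (by simp)
    have := ih (fun c hc => hd c (by simp [hc]))
    simp [List.takeWhile_cons, List.dropWhile_cons, ha, this.1, this.2]

theorem pv_startswith_iff (line n : List Char) (d : Char) :
    PySem.Chars.startswith line (n ++ [d]) = true ↔ ∃ t, line = n ++ d :: t := by
  rw [PySem.Chars.startswith_iff]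
  constructor
  · rintro ⟨t, ht⟩; exact ⟨t, by rw [← ht]; simp⟩
  · rintro ⟨t, ht⟩; exact ⟨t, by rw [ht]; simp⟩

-- the heart: A's sep scan over one line equals B's key/value extraction filtered on n
theorem pv_matchSeps_eq (n line : List Char) (hn : n ≠ [])
    (hd : ∀ c ∈ n, PySem.Chars.isdigit c = true) :
    pvMatchSeps n line pvSeps =
      (match pvLineKV? line with
       | some kv => if kv.1 = n then some kv.2 else none
       | none => none) := by
  rcases hrest : line.dropWhile PySem.Chars.isdigit with _ | ⟨c, t⟩
  · -- line all digits: no separator anywhere after a digit run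
    have hall : ∀ c ∈ line, PySem.Chars.isdigit c = true := by
      have h1 : line.takeWhile PySem.Chars.isdigit = line := by
        conv_rhs => rw [← List.takeWhile_append_dropWhile (p := PySem.Chars.isdigit) (l := line)]
        rw [hrest]; simp
      intro c hc
      rw [← h1] at hc
      exact List.mem_takeWhile_imp hc
    have hsw : ∀ d, PySem.Chars.isdigit d = false →
        PySem.Chars.startswith line (n ++ [d]) = false := by
      intro d hdd
      rw [Bool.eq_false_iff]
      intro h
      rcases (pv_startswith_iff line n d).mp h with ⟨t, ht⟩
      have : PySem.Chars.isdigit d = true := hall d (by rw [ht]; simp)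
      simp [hdd] at this
    simp [pvLineKV?, hrest, pvMatchSeps, pvSeps,
      hsw '.' (by decide), hsw '-' (by decide), hsw ')' (by decide), hsw ' ' (by decide)]
  · have hne : line.dropWhile PySem.Chars.isdigit ≠ [] := by simp [hrest]
    have hc : PySem.Chars.isdigit c = false := by
      have := List.head_dropWhile_not PySem.Chars.isdigit hne
      simpa [hrest] using this
    have hline : line = line.takeWhile PySem.Chars.isdigit ++ c :: t := by
      conv_lhs => rw [← List.takeWhile_append_dropWhile (p := PySem.Chars.isdigit) (l := line)]
      rw [hrest]
    have hsw : ∀ d, PySem.Chars.isdigit d = false →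
        PySem.Chars.startswith line (n ++ [d]) =
          (line.takeWhile PySem.Chars.isdigit == n && c == d) := by
      intro d hdd
      by_cases h : line.takeWhile PySem.Chars.isdigit = n ∧ c = d
      · obtain ⟨h1, h2⟩ := h
        subst h2
        rw [h1] at hline
        simp only [h1, beq_self_eq_true, Bool.and_self, Bool.true_and]
        rw [(pv_startswith_iff line n c).mpr ⟨t, hline⟩]
      · have hnot : ¬ ∃ t', line = n ++ d :: t' := by
          rintro ⟨t', ht'⟩
          have hs := pv_takeWhile_split n hd d hdd t'
          rw [← ht'] at hs
          rw [hs.2] at hrest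
          exact h ⟨hs.1, (List.cons.injEq _ _ _ _ ▸ hrest).1.symm ▸ rfl⟩
        have : PySem.Chars.startswith line (n ++ [d]) = false := by
          rw [Bool.eq_false_iff]; intro hx; exact hnot ((pv_startswith_iff line n d).mp hx)
        rw [this]
        rcases Decidable.not_and_iff_not_or_not.mp h with h1 | h1 <;> simp [h1]
    by_cases hpre : line.takeWhile PySem.Chars.isdigit = n
    · have hlinen : line = n ++ c :: t := by rw [← hpre]; exact hline
      have hdrop : line.drop (n.length + 1) = t := by
        rw [hlinen, show n ++ c :: t = (n ++ [c]) ++ t by simp,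
          show n.length + 1 = (n ++ [c]).length by simp]
        exact List.drop_left
      by_cases hcs : c ∈ pvSeps
      · have hsw1 := hsw '.' (by decide)
        have hsw2 := hsw '-' (by decide)
        have hsw3 := hsw ')' (by decide)
        have hsw4 := hsw ' ' (by decide)
        clear hline hne hsw
        fin_cases hcs <;>
          simp [pvMatchSeps, pvSeps, pvLineKV?, hrest, hpre, hn,
            hsw1, hsw2, hsw3, hsw4, hdrop, pvSeps]
      · have : ∀ d, (c == d) = false ∨ c = d := by intro d; by_cases h : c = d <;> simp [h]
        simp [pvMatchSeps, pvSeps, pvLineKV?, hrest,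
          hsw '.' (by decide), hsw '-' (by decide), hsw ')' (by decide), hsw ' ' (by decide),
          hcs, show c ≠ '.' from fun h => hcs (by simp [pvSeps, h]),
          show c ≠ '-' from fun h => hcs (by simp [pvSeps, h]),
          show c ≠ ')' from fun h => hcs (by simp [pvSeps, h]),
          show c ≠ ' ' from fun h => hcs (by simp [pvSeps, h])]
    · have hL : pvMatchSeps n line pvSeps = none := by
        simp [pvMatchSeps, pvSeps, hsw '.' (by decide), hsw '-' (by decide),
          hsw ')' (by decide), hsw ' ' (by decide), hpre]
      rw [hL]
      simp only [pvLineKV?, hrest]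
      split_ifs <;> simp [hpre]

-- B's indexing fold looked up at a canonical numeral key = A's first-match scan
theorem pv_ofList_inj {a b : List Char} (h : String.ofList a = String.ofList b) : a = b := by
  have := congrArg String.toList h
  simpa using this

theorem pv_fold_get (n : List Char) (hn : n ≠ [])
    (hd : ∀ c ∈ n, PySem.Chars.isdigit c = true) (lines : List (List Char))
    (d : PySem.Dict String String) :
    ((lines.foldl (fun (d : PySem.Dict String String) line =>
        match pvLineKV? line with
        | some kv => d.setdefault (String.ofList kv.1) (String.ofList kv.2)
        | none => d) d).get? (String.ofList n)) =
      (d.get? (String.ofList n)).or ((pvFindMatch n lines).map String.ofList) := by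
  induction lines generalizing d with
  | nil => simp [pvFindMatch]
  | cons line rest ih =>
    rw [List.foldl_cons, ih]
    have hms := pv_matchSeps_eq n line hn hd
    rcases hkv : pvLineKV? line with _ | ⟨kv⟩
    · rw [hkv] at hms
      simp only [hkv, pvFindMatch, hms]
    · rw [hkv] at hms
      by_cases hk : kv.1 = n
      · simp only [hk, if_pos rfl] at hms
        simp only [hkv, pvFindMatch, hms, hk]
        rw [PySem.Dict.get?_setdefault_self]
        rcases d.get? (String.ofList n) with _ | v <;> simp
      · simp only [if_neg hk] at hms
        simp only [hkv, pvFindMatch, hms]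
        rw [PySem.Dict.get?_setdefault_of_ne]
        intro h
        exact hk (pv_ofList_inj h).symm

theorem pv_enumerate_nonneg {α : Type} (qs : List α) (k : Int) (p : Int × α)
    (hp : p ∈ PySem.List.enumerate qs k) : k ≤ p.1 := by
  induction qs generalizing k with
  | nil => simp [PySem.List.enumerate] at hp
  | cons q qs ih =>
    rw [PySem.List.enumerate_cons] at hp
    rcases List.mem_cons.mp hp with h | h
    · simp [h]
    · have := ih (k + 1) h; omega

-- ===== VERDICT (by name: the statement is the Claim_ definition above) =====
theorem parse_numbered_py_spec : Claim_equal_parse_numbered_py := by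
  intro raw questions _
  unfold Spec_parse_numbered_py parse_numbered_py parse_numbered_py_alt
  dsimp only
  apply congrArg PySem.Dict.items
  apply PySem.List.foldl_congr_mem
  intro d iq hiq
  have hi : (0:Int) ≤ iq.1 := pv_enumerate_nonneg questions 0 iq hiq
  obtain ⟨hn, hd⟩ := pv_toChars_digits (iq.1 + 1) (by omega)
  apply congrArg (d.insert iq.2)
  rw [show PySem.Int.toStr (iq.1+1) = String.ofList (PySem.Int.toChars (iq.1+1)) from rfl]
  rw [pv_fold_get _ hn hd _ _, PySem.Dict.get?_empty, Option.none_or]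
  rcases h : pvFindMatch (PySem.Int.toChars (iq.1 + 1))
      (((PySem.Chars.splitlines raw.toList).map PySem.Chars.strip).filter (fun l => !l.isEmpty)) with _ | m <;>
    simp [h]
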